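-- pv_equiv track=rewrite | github.com/njayco/scoremybars | utils/ai_scorer.py | _words_rhyme
-- ===== SOURCE A (Python) =====
-- def _words_rhyme(word1: str, word2: str) -> bool:
--     """Check if two words rhyme"""
--     # Simple rhyme detection based on ending sounds
--     word1_clean = ''.join(c for c in word1.lower() if c.isalpha())
--     word2_clean = ''.join(c for c in word2.lower() if c.isalpha())
--
--     if len(word1_clean) < 2 or len(word2_clean) < 2:
--         return False
--
--     # Check last 2-3 characters for rhyme
--     for length in [3, 2]:
--         if len(word1_clean) >= length and len(word2_clean) >= length:
--             if word1_clean[-length:] == word2_clean[-length:]: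
--                 return True
--
--     return False
-- ===== SOURCE B (Python) =====
-- def _words_rhyme(word1: str, word2: str) -> bool:
--     """Check if two words rhyme"""
--     # Scan each word backwards and stop as soon as the last two letters are
--     # found; no cleaned copy of the word is ever built, and the suffix-length
--     # loop disappears (a last-3 match implies a last-2 match).
--     def last_two(word):
--         last = None
--         for ch in reversed(word):
--             c = ch.lower()
--             if c.isalpha():
--                 if last is None:
--                     last = c
--                 else:
--                     return (c, last)
--         return None
--
--     t1 = last_two(word1)
--     t2 = last_two(word2)
--     return t1 is not None and t2 is not None and t1 == t2
-- ===== Notes on version B (the rewrite author's own statement) =====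
-- stated objective: faster
-- what changed: Instead of building both cleaned strings and looping over suffix lengths [3, 2], B scans each word backwards with an early exit, collecting just the last two lowercased letters and comparing the two pairs (the length-3 check is redundant since equal last-3 letters imply equal last-2).
import Mathlib
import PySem

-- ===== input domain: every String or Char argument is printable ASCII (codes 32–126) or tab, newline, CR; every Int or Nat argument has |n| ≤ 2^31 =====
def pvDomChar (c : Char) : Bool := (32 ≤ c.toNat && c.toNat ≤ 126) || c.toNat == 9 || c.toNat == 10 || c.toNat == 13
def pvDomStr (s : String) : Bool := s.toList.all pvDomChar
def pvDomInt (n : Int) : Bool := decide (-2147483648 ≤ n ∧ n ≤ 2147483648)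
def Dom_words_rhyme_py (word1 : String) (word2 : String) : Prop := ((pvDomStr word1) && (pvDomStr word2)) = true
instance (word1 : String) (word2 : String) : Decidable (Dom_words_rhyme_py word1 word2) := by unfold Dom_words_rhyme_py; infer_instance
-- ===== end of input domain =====

-- B replaces A's clean-both-words-then-loop-over-suffix-lengths-[3,2] by a single
-- backward scan per word with early exit, collecting only the last two lowercased
-- letters (the length-3 check is redundant); objective: alternative decomposition.


-- ===== PORT A =====

-- ''.join(c for c in word.lower() if c.isalpha())
def cleanWord (word : String) : List Char :=
  (PySem.Chars.lower word.toList).filter PySem.Chars.isalpha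

-- the 'for length in [3, 2]' loop with its early 'return True'; falls through to False
def rhymeLoopA (c1 c2 : List Char) : List Nat → Bool
  | [] => false
  | l :: rest =>
    if l ≤ c1.length && l ≤ c2.length then
      if PySem.List.slice c1 (some (-(l : Int))) none
           = PySem.List.slice c2 (some (-(l : Int))) none then
        true
      else rhymeLoopA c1 c2 rest
    else rhymeLoopA c1 c2 rest

def words_rhyme_py (word1 : String) (word2 : String) : Bool :=
  let word1_clean := cleanWord word1
  let word2_clean := cleanWord word2
  if word1_clean.length < 2 || word2_clean.length < 2 then false
  else rhymeLoopA word1_clean word2_clean [3, 2]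

-- ===== PORT B =====

-- the 'for ch in reversed(word)' loop of last_two: state = 'last' (None or the
-- last letter seen); early 'return (c, last)' when the second letter is found
def lastTwoAux : List Char → Option Char → Option (Char × Char)
  | [], _ => none
  | ch :: rest, last =>
    let c := PySem.Chars.lowerChar ch
    if PySem.Chars.isalpha c then
      match last with
      | none => lastTwoAux rest (some c)
      | some d => some (c, d)
    else lastTwoAux rest last

-- last_two(word): the last two letters of word, lowercased, or None
def lastTwo (word : String) : Option (Char × Char) :=
  lastTwoAux word.toList.reverse none

-- t1 is not None and t2 is not None and t1 == t2
def words_rhyme_py_alt (word1 : String) (word2 : String) : Bool :=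
  match lastTwo word1, lastTwo word2 with
  | some t1, some t2 => t1 == t2
  | _, _ => false

-- ===== PRECONDITION & SPEC =====
def Spec_words_rhyme_py (word1 : String) (word2 : String) (out : Bool) : Prop := out = words_rhyme_py_alt word1 word2
instance (word1 : String) (word2 : String) (out : Bool) : Decidable (Spec_words_rhyme_py word1 word2 out) := by unfold Spec_words_rhyme_py; infer_instance

-- ===== CLAIM (what is proved, stated in full; the proofs are below) =====
def Claim_equal_words_rhyme_py : Prop := ∀ (word1 : String) (word2 : String), Dom_words_rhyme_py word1 word2 → Spec_words_rhyme_py word1 word2 (words_rhyme_py word1 word2)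

-- ===== LEMMAS AND PROOFS =====

-- equal last-3 suffixes imply equal last-2 suffixes
lemma suffix3_imp_suffix2 (c1 c2 : List Char) (h1 : 3 ≤ c1.length) (h2 : 3 ≤ c2.length)
    (h : c1.drop (c1.length - 3) = c2.drop (c2.length - 3)) :
    c1.drop (c1.length - 2) = c2.drop (c2.length - 2) := by
  have key : ∀ (c : List Char), 3 ≤ c.length →
      c.drop (c.length - 2) = (c.drop (c.length - 3)).drop 1 := by
    intro c hc
    rw [List.drop_drop]
    congr 1
    omega
  rw [key c1 h1, key c2 h2, h]

-- A reduced: its value is the last-2 comparison of the cleaned words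
lemma words_rhyme_py_eq (word1 word2 : String) :
    words_rhyme_py word1 word2 =
      (decide (2 ≤ (cleanWord word1).length) && decide (2 ≤ (cleanWord word2).length)
        && decide ((cleanWord word1).drop ((cleanWord word1).length - 2)
                    = (cleanWord word2).drop ((cleanWord word2).length - 2))) := by
  unfold words_rhyme_py
  set c1 := cleanWord word1
  set c2 := cleanWord word2
  by_cases hshort : c1.length < 2 ∨ c2.length < 2
  · simp only []
    rw [if_pos (by simpa [decide_eq_true_iff] using hshort)]
    rcases hshort with h | h
    · simp [show ¬ (2 ≤ c1.length) by omega]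
    · simp [show ¬ (2 ≤ c2.length) by omega]
  · push Not at hshort
    obtain ⟨hl1, hl2⟩ := hshort
    rw [if_neg (by simp; omega)]
    have s1 : PySem.List.slice c1 (some (-2)) none = c1.drop (c1.length - 2) := by
      rw [show ((-2 : Int)) = -((2 : Nat) : Int) by norm_num,
        PySem.List.slice_from_neg_natCast _ _ (by omega)]
    have s2 : PySem.List.slice c2 (some (-2)) none = c2.drop (c2.length - 2) := by
      rw [show ((-2 : Int)) = -((2 : Nat) : Int) by norm_num,
        PySem.List.slice_from_neg_natCast _ _ (by omega)]
    simp only [rhymeLoopA, decide_eq_true (by omega : 2 ≤ c1.length),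
      decide_eq_true (by omega : 2 ≤ c2.length), Bool.true_and]
    by_cases h3 : 3 ≤ c1.length ∧ 3 ≤ c2.length
    · obtain ⟨h31, h32⟩ := h3
      rw [if_pos (by simp [h31, h32])]
      have t1 : PySem.List.slice c1 (some (-((3:Nat) : Int))) none = c1.drop (c1.length - 3) :=
        PySem.List.slice_from_neg_natCast _ _ (by omega)
      have t2 : PySem.List.slice c2 (some (-((3:Nat) : Int))) none = c2.drop (c2.length - 3) :=
        PySem.List.slice_from_neg_natCast _ _ (by omega)
      by_cases heq3 : PySem.List.slice c1 (some (-((3:Nat) : Int))) none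
          = PySem.List.slice c2 (some (-((3:Nat) : Int))) none
      · rw [if_pos (by exact_mod_cast heq3)]
        have := suffix3_imp_suffix2 c1 c2 h31 h32 (by rw [← t1, ← t2]; exact heq3)
        simp [this]
      · rw [if_neg (by exact_mod_cast heq3), if_pos (by simp)]
        split <;> simp_all
    · rw [if_neg (by simpa using h3), if_pos (by simp)]
      split <;> simp_all

-- the backward scan with 'last' already set finds the head of the remaining letters
lemma lastTwoAux_some (l : List Char) (d : Char) :
    lastTwoAux l (some d) =
      match (l.map PySem.Chars.lowerChar).filter PySem.Chars.isalpha with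
      | a :: _ => some (a, d)
      | [] => none := by
  induction l with
  | nil => rfl
  | cons ch rest ih =>
    simp only [lastTwoAux, List.map_cons, List.filter_cons]
    by_cases hp : PySem.Chars.isalpha (PySem.Chars.lowerChar ch) <;> simp [hp, ih]

-- the backward scan from scratch finds the first two letters of the filtered reversal
lemma lastTwoAux_none (l : List Char) :
    lastTwoAux l none =
      match (l.map PySem.Chars.lowerChar).filter PySem.Chars.isalpha with
      | a :: b :: _ => some (b, a)
      | _ => none := by
  induction l with
  | nil => rfl
  | cons ch rest ih =>
    simp only [lastTwoAux, List.map_cons, List.filter_cons]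
    by_cases hp : PySem.Chars.isalpha (PySem.Chars.lowerChar ch)
    · simp only [hp, if_true, lastTwoAux_some]
      cases (rest.map PySem.Chars.lowerChar).filter PySem.Chars.isalpha <;> rfl
    · simp [hp, ih]

-- lastTwo in terms of the cleaned word of port A
lemma lastTwo_eq (word : String) :
    lastTwo word =
      match (cleanWord word).reverse with
      | a :: b :: _ => some (b, a)
      | _ => none := by
  unfold lastTwo cleanWord
  rw [lastTwoAux_none, List.map_reverse, List.filter_reverse]
  rfl

-- if the reversal starts with a :: b :: _, the last-2 suffix is [b, a]
lemma drop_two_of_reverse (c : List Char) (a b : Char) (r : List Char)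
    (h : c.reverse = a :: b :: r) : c.drop (c.length - 2) = [b, a] := by
  have hc : c = r.reverse ++ [b, a] := by
    have := congrArg List.reverse h
    simpa using this
  subst hc
  have : (r.reverse ++ [b, a]).length - 2 = r.reverse.length := by simp
  rw [this, List.drop_left]

-- ===== VERDICT (by name: the statement is the Claim_ definition above) =====
theorem words_rhyme_py_spec : Claim_equal_words_rhyme_py := by
  intro word1 word2 _
  unfold Spec_words_rhyme_py words_rhyme_py_alt
  rw [words_rhyme_py_eq, lastTwo_eq, lastTwo_eq]
  set c1 := cleanWord word1
  set c2 := cleanWord word2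
  match h1 : c1.reverse, h2 : c2.reverse with
  | [], _ =>
    have : c1.length = 0 := by simpa using congrArg List.length h1
    simp [show ¬ (2 ≤ c1.length) by omega]
  | [a], _ =>
    have : c1.length = 1 := by simpa using congrArg List.length h1
    simp [show ¬ (2 ≤ c1.length) by omega]
  | _ :: _ :: _, [] =>
    have : c2.length = 0 := by simpa using congrArg List.length h2
    simp [show ¬ (2 ≤ c2.length) by omega]
  | _ :: _ :: _, [a] =>
    have : c2.length = 1 := by simpa using congrArg List.length h2
    simp [show ¬ (2 ≤ c2.length) by omega]
  | a1 :: b1 :: r1, a2 :: b2 :: r2 =>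
    have hl1 : 2 ≤ c1.length := by
      have := congrArg List.length h1; simp at this; omega
    have hl2 : 2 ≤ c2.length := by
      have := congrArg List.length h2; simp at this; omega
    rw [drop_two_of_reverse c1 a1 b1 r1 h1, drop_two_of_reverse c2 a2 b2 r2 h2]
    simp only [decide_eq_true hl1, decide_eq_true hl2, Bool.true_and]
    by_cases he : (b1, a1) = (b2, a2)
    · obtain ⟨hb, ha⟩ := Prod.mk.injEq .. ▸ he
      simp_all
    · have : ¬ ([b1, a1] = [b2, a2]) := by
        intro hc; apply he; injection hc with h1' h2'; injection h2' with h2'' _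
        exact Prod.ext h1' h2''
      simp [this, he]
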